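-- pv_equiv track=rewrite | github.com/JisungKim94/CodingTest | Programmers/lessons_63062_징검다리건너기_이분탐색.py | solution
-- ===== SOURCE A (Python) =====
-- def solution(stones, k):
--     l, r = 0, max(stones)
--     answer = 1
--     while l <= r:
--         mid = (l + r) // 2
--         zero_stone = 0
--         binary_search = True
--         for stone in stones:
--             if stone < mid:
--                 zero_stone += 1
--                 if zero_stone == k:
--                     binary_search = False
--                     break
--             else:
--                 zero_stone = 0
--         if binary_search:
--             answer = max(answer, mid)
--             l = mid + 1
--         else:
--             r = mid - 1
--     return answer
-- ===== SOURCE B (Python) =====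
-- def solution(stones, k):
--     # Direct formulation: the answer is the minimum over all k-windows of the
--     # window maximum (clamped below by 1); no binary search needed.
--     n = len(stones)
--     if 0 < k <= n:
--         m = min(max(stones[i:i+k]) for i in range(n - k + 1))
--     else:
--         m = max(stones)
--     return m if m > 1 else 1
-- ===== Notes on version B (the rewrite author's own statement) =====
-- stated objective: simpler
-- what changed: Replaced the binary search over jump values with its feasibility scan by a direct computation: the answer is the minimum over all k-element windows of the window maximum (clamped below by 1).
import Mathlib
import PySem

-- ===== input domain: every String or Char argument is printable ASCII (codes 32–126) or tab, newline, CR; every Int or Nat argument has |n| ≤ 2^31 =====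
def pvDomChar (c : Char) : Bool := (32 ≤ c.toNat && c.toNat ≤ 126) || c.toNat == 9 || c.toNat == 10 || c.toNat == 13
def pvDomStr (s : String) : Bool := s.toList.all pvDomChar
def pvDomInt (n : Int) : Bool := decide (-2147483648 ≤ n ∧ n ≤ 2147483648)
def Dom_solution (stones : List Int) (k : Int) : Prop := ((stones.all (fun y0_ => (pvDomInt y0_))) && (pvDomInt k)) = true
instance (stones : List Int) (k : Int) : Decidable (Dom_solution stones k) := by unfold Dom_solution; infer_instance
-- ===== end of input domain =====

-- B replaces A's binary search by the direct min-over-k-windows-of-window-max formula (objective: simpler).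

-- ===== PORT A =====
-- the inner 'for stone in stones' scan: returns the final value of binary_search
def checkA (k mid : Int) : List Int → Int → Bool
  | [], _ => true
  | s :: rest, z =>
    if s < mid then
      if z + 1 = k then false else checkA k mid rest (z + 1)
    else checkA k mid rest 0

-- the 'while l <= r' binary-search loop
def loopA (stones : List Int) (k : Int) (l r answer : Int) : Int :=
  if h : l ≤ r then
    let mid := PySem.Int.floordiv (l + r) 2
    if checkA k mid stones 0 then
      loopA stones k (mid + 1) r (max answer mid)
    else
      loopA stones k l (mid - 1) answer
  else answer
termination_by (r + 1 - l).toNat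
decreasing_by
  · have := PySem.Int.floordiv_two_mid_bounds h
    omega
  · have := PySem.Int.floordiv_two_mid_bounds h
    omega

def solution (stones : List Int) (k : Int) : Int :=
  loopA stones k 0 ((PySem.List.max? stones (fun x => x)).getD 0) 1

-- ===== PORT B =====
def solution_alt (stones : List Int) (k : Int) : Int :=
  let n : Int := PySem.List.len stones
  let m : Int :=
    if 0 < k ∧ k ≤ n then
      ((PySem.List.min?
          ((PySem.List.pyRange 0 (n - k + 1) 1).map (fun i =>
            (PySem.List.max? (PySem.List.slice stones (some i) (some (i + k))) (fun x => x)).getD 0))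
          (fun x => x)).getD 0)
    else
      (PySem.List.max? stones (fun x => x)).getD 0
  if m > 1 then m else 1

-- ===== PRECONDITION & SPEC =====
-- Pre_ excludes only the empty list, on which A raises ValueError (max of an empty sequence).
def Pre_solution (stones : List Int) (k : Int) : Prop := stones ≠ []
instance (stones : List Int) (k : Int) : Decidable (Pre_solution stones k) := by unfold Pre_solution; infer_instance

def pvWitness_solution : List Int × Int := ([2, 4, 5, 3, 2, 1, 4, 2, 5, 1], 3)

def Spec_solution (stones : List Int) (k : Int) (out : Int) : Prop := out = solution_alt stones k
instance (stones : List Int) (k : Int) (out : Int) : Decidable (Spec_solution stones k out) := by unfold Spec_solution; infer_instance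

-- ===== CLAIM (what is proved, stated in full; the proofs are below) =====
def Claim_equal_solution : Prop := ∀ (stones : List Int) (k : Int), Dom_solution stones k → Pre_solution stones k → Spec_solution stones k (solution stones k)

-- ===== LEMMAS AND PROOFS =====

-- all elements below mid
def allB (mid : Int) (l : List Int) : Bool := l.all (fun x => decide (x < mid))

-- some window of kn consecutive elements all below mid
def win (mid : Int) (kn : Nat) (l : List Int) : Prop :=
  ∃ i : Nat, i + kn ≤ l.length ∧ allB mid ((l.drop i).take kn) = true

def windowL (stones : List Int) (kn j : Nat) : List Int := (stones.drop j).take kn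

def wmaxL (stones : List Int) (kn : Nat) : List Int :=
  (List.range (stones.length - kn + 1)).map
    (fun j => (PySem.List.max? (windowL stones kn j) (fun x => x)).getD 0)

def MW (stones : List Int) (kn : Nat) : Int :=
  (PySem.List.min? (wmaxL stones kn) (fun x => x)).getD 0

lemma allB_take_mono (mid : Int) (l : List Int) (c c' : Nat) (hcc : c ≤ c')
    (h : allB mid (l.take c') = true) : allB mid (l.take c) = true := by
  simp only [allB, List.all_eq_true] at *
  intro x hx
  have : x ∈ List.take c (List.take c' l) := by
    rw [List.take_take, Nat.min_eq_left hcc]; exact hx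
  exact h x (List.mem_of_mem_take this)

lemma win_cons_of_lt (mid : Int) (kn : Nat) (s : Int) (rest : List Int) (hs : s < mid) :
    win mid kn (s :: rest) ↔
      (kn - 1 ≤ rest.length ∧ allB mid (rest.take (kn - 1)) = true) ∨ win mid kn rest := by
  constructor
  · rintro ⟨i, hi, hall⟩
    cases i with
    | zero =>
      left
      simp only [List.length_cons, Nat.zero_add] at hi
      refine ⟨by omega, ?_⟩
      rcases Nat.eq_zero_or_pos kn with hk0 | hk0
      · simp [hk0, allB]
      · have : kn = (kn - 1) + 1 := by omega
        rw [List.drop_zero, this, List.take_succ_cons] at hall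
        simp only [allB, List.all_cons, Bool.and_eq_true] at hall
        exact hall.2
    | succ j =>
      right
      exact ⟨j, by simp at hi; omega, by simpa using hall⟩
  · rintro (⟨h1, h2⟩ | ⟨j, hj, hall⟩)
    · rcases Nat.eq_zero_or_pos kn with hk0 | hk0
      · exact ⟨0, by simp [hk0], by simp [hk0, allB]⟩
      · refine ⟨0, by simp; omega, ?_⟩
        have : kn = (kn - 1) + 1 := by omega
        rw [List.drop_zero, this, List.take_succ_cons]
        simp only [allB, List.all_cons, Bool.and_eq_true, decide_eq_true_eq]
        exact ⟨hs, h2⟩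
    · exact ⟨j + 1, by simp; omega, by simpa using hall⟩

lemma win_cons_of_ge (mid : Int) (kn : Nat) (hk : 0 < kn) (s : Int) (rest : List Int) (hs : ¬ s < mid) :
    win mid kn (s :: rest) ↔ win mid kn rest := by
  constructor
  · rintro ⟨i, hi, hall⟩
    cases i with
    | zero =>
      exfalso
      have : kn = (kn - 1) + 1 := by omega
      rw [List.drop_zero, this, List.take_succ_cons] at hall
      simp only [allB, List.all_cons, Bool.and_eq_true, decide_eq_true_eq] at hall
      exact hs hall.1
    | succ j =>
      exact ⟨j, by simp at hi; omega, by simpa using hall⟩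
  · rintro ⟨j, hj, hall⟩
    exact ⟨j + 1, by simp; omega, by simpa using hall⟩

-- characterisation of the inner scan
lemma checkA_char (mid : Int) (kn : Nat) (hk : 0 < kn) :
    ∀ (l : List Int) (z : Nat), z < kn →
      (checkA (kn : Int) mid l (z : Int) = false ↔
        ((kn - z ≤ l.length ∧ allB mid (l.take (kn - z)) = true) ∨ win mid kn l)) := by
  intro l
  induction l with
  | nil =>
    intro z hz
    constructor
    · intro h; simp [checkA] at h
    · rintro (⟨h1, _⟩ | ⟨i, hi, _⟩)
      · simp at h1; omega
      · simp at hi; omega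
  | cons s rest ih =>
    intro z hz
    simp only [checkA]
    by_cases hs : s < mid
    · rw [if_pos hs]
      by_cases hzk : (z : Int) + 1 = (kn : Int)
      · rw [if_pos hzk]
        constructor
        · intro _
          left
          have : kn - z = 1 := by omega
          rw [this]
          simp [allB, hs, List.length_cons]
        · intro _; rfl
      · rw [if_neg hzk]
        have hz1 : z + 1 < kn := by omega
        have : (z : Int) + 1 = ((z + 1 : Nat) : Int) := by push_cast; ring
        rw [this, ih (z + 1) hz1]
        rw [win_cons_of_lt mid kn s rest hs]
        constructor
        · rintro (⟨h1, h2⟩ | h)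
          · left
            constructor
            · simp [List.length_cons]; omega
            · have : kn - z = (kn - (z+1)) + 1 := by omega
              rw [this, List.take_succ_cons]
              simp [allB] at h2 ⊢
              exact ⟨hs, h2⟩
          · right; right; exact h
        · rintro (⟨h1, h2⟩ | (⟨h1, h2⟩ | h))
          · left
            have he : kn - z = (kn - (z+1)) + 1 := by omega
            rw [he, List.take_succ_cons] at h2
            simp only [allB, List.all_cons, Bool.and_eq_true] at h2
            constructor
            · simp [List.length_cons] at h1; omega
            · exact h2.2
          · -- prefix of rest of length kn - 1 implies prefix of length kn - (z+1)
            left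
            exact ⟨by omega, allB_take_mono mid rest _ _ (by omega) h2⟩
          · right; exact h
    · rw [if_neg hs]
      rw [show (0 : Int) = ((0 : Nat) : Int) by norm_num, ih 0 hk]
      rw [win_cons_of_ge mid kn hk s rest hs]
      constructor
      · rintro (⟨h1, h2⟩ | h)
        · -- prefix of rest of length kn is window i = 0 of rest
          right
          exact ⟨0, by simpa using h1, by simpa using h2⟩
        · right; exact h
      · rintro (⟨h1, h2⟩ | h)
        · -- a below-mid prefix of s::rest would contain s: contradiction
          exfalso
          have hkz : kn - z = (kn - z - 1) + 1 := by omega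
          rw [hkz, List.take_succ_cons] at h2
          simp only [allB, List.all_cons, Bool.and_eq_true, decide_eq_true_eq] at h2
          exact hs h2.1
        · exact Or.inr h

lemma checkA_true_of_k_nonpos (k mid : Int) (hk : k ≤ 0) :
    ∀ (l : List Int) (z : Int), 0 ≤ z → checkA k mid l z = true := by
  intro l
  induction l with
  | nil => intro z _; simp [checkA]
  | cons s rest ih =>
    intro z hz
    simp only [checkA]
    split_ifs with h1 h2
    · omega
    · exact ih (z + 1) (by omega)
    · exact ih 0 (by omega)

lemma checkA_true_of_k_large (k mid : Int) :
    ∀ (l : List Int) (z : Int), 0 ≤ z → (z + l.length : Int) < k → checkA k mid l z = true := by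
  intro l
  induction l with
  | nil => intro z _ _; simp [checkA]
  | cons s rest ih =>
    intro z hz hlt
    simp only [List.length_cons] at hlt
    simp only [checkA]
    split_ifs with h1 h2
    · push_cast at hlt; omega
    · exact ih (z + 1) (by omega) (by push_cast at hlt ⊢; omega)
    · exact ih 0 (by omega) (by push_cast at hlt ⊢; omega)

-- the binary-search loop against an exact feasibility bound M
lemma loopA_eval (stones : List Int) (k M : Int) :
    ∀ (n : Nat) (l r a : Int), (r + 1 - l).toNat ≤ n →
      (∀ mid, l ≤ mid → mid ≤ r → (checkA k mid stones 0 = true ↔ mid ≤ M)) →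
      loopA stones k l r a = if l ≤ r then (if l ≤ M then max a (min M r) else a) else a := by
  intro n
  induction n with
  | zero =>
    intro l r a hn _
    have hlr : ¬ l ≤ r := by omega
    rw [loopA, dif_neg hlr, if_neg hlr]
  | succ n ih =>
    intro l r a hn hF
    by_cases hlr : l ≤ r
    · rw [loopA, dif_pos hlr, if_pos hlr]
      have hmid := PySem.Int.floordiv_two_mid_bounds hlr
      set mid := PySem.Int.floordiv (l + r) 2 with hmiddef
      by_cases hfeas : checkA k mid stones 0 = true
      · rw [if_pos hfeas]
        have hMmid : mid ≤ M := (hF mid hmid.1 hmid.2).1 hfeas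
        rw [ih (mid + 1) r (max a mid) (by omega)
          (fun m h1 h2 => hF m (by omega) h2)]
        split_ifs <;> omega
      · rw [if_neg hfeas]
        have hMmid : M < mid := by
          by_contra hc
          exact hfeas ((hF mid hmid.1 hmid.2).2 (by omega))
        rw [ih l (mid - 1) a (by omega)
          (fun m h1 h2 => hF m h1 (by omega))]
        split_ifs <;> omega
    · rw [loopA, dif_neg hlr, if_neg hlr]

lemma windowL_ne_nil (stones : List Int) (kn j : Nat) (hk : 0 < kn) (hj : j + kn ≤ stones.length) :
    windowL stones kn j ≠ [] := by
  have : (windowL stones kn j).length = min kn (stones.length - j) := by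
    simp [windowL]
  intro hnil
  rw [hnil] at this
  simp at this
  omega

lemma mid_le_wj (stones : List Int) (kn j : Nat) (mid : Int) (hk : 0 < kn)
    (hj : j + kn ≤ stones.length) :
    (mid ≤ (PySem.List.max? (windowL stones kn j) (fun x => x)).getD 0 ↔
      ∃ x ∈ windowL stones kn j, mid ≤ x) := by
  have hne := windowL_ne_nil stones kn j hk hj
  rcases hmax : PySem.List.max? (windowL stones kn j) (fun x => x) with _ | Mj
  · exact absurd ((PySem.List.max?_eq_none_iff _ _).mp hmax) hne
  · simp only [Option.getD_some]
    constructor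
    · intro h; exact ⟨Mj, PySem.List.max?_mem hmax, h⟩
    · rintro ⟨x, hx, hmx⟩
      exact le_trans hmx (PySem.List.max?_isMax hmax x hx)

lemma mid_le_MW (stones : List Int) (kn : Nat) (mid : Int)
    (hn : kn ≤ stones.length) :
    (mid ≤ MW stones kn ↔
      ∀ j : Nat, j + kn ≤ stones.length →
        mid ≤ (PySem.List.max? (windowL stones kn j) (fun x => x)).getD 0) := by
  have hnel : wmaxL stones kn ≠ [] := by
    simp [wmaxL, List.map_eq_nil_iff, List.range_eq_nil]
  rcases hmin : PySem.List.min? (wmaxL stones kn) (fun x => x) with _ | m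
  · exact absurd ((PySem.List.min?_eq_none_iff _ _).mp hmin) hnel
  · simp only [MW, hmin, Option.getD_some]
    constructor
    · intro h j hj
      have hjmem : (PySem.List.max? (windowL stones kn j) (fun x => x)).getD 0 ∈ wmaxL stones kn := by
        simp only [wmaxL, List.mem_map]
        exact ⟨j, List.mem_range.mpr (by omega), rfl⟩
      exact le_trans h (PySem.List.min?_isMin hmin _ hjmem)
    · intro h
      have hmmem := PySem.List.min?_mem hmin
      simp only [wmaxL, List.mem_map] at hmmem
      rcases hmmem with ⟨j, hjr, hje⟩
      rw [← hje]
      exact h j (by rw [List.mem_range] at hjr; omega)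

lemma not_win_iff_MW (stones : List Int) (kn : Nat) (mid : Int) (hk : 0 < kn)
    (hn : kn ≤ stones.length) :
    (¬ win mid kn stones ↔ mid ≤ MW stones kn) := by
  rw [mid_le_MW stones kn mid hn]
  constructor
  · intro hnw j hj
    rw [mid_le_wj stones kn j mid hk hj]
    by_contra hc
    push Not at hc
    exact hnw ⟨j, hj, by
      simp only [allB, List.all_eq_true, decide_eq_true_eq]
      intro x hx
      have := hc x hx
      omega⟩
  · rintro h ⟨i, hi, hall⟩
    have := (mid_le_wj stones kn i mid hk hi).mp (h i hi)
    rcases this with ⟨x, hx, hmx⟩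
    simp only [allB, List.all_eq_true, decide_eq_true_eq] at hall
    exact absurd (hall x hx) (by omega)

lemma MW_le_of_max (stones : List Int) (kn : Nat) (r0 : Int) (hk : 0 < kn)
    (hn : kn ≤ stones.length) (hmax : ∀ y ∈ stones, y ≤ r0) :
    MW stones kn ≤ r0 := by
  have hnel : wmaxL stones kn ≠ [] := by
    simp [wmaxL, List.map_eq_nil_iff, List.range_eq_nil]
  rcases hmin : PySem.List.min? (wmaxL stones kn) (fun x => x) with _ | m
  · exact absurd ((PySem.List.min?_eq_none_iff _ _).mp hmin) hnel
  · simp only [MW, hmin, Option.getD_some]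
    have hmmem := PySem.List.min?_mem hmin
    simp only [wmaxL, List.mem_map] at hmmem
    rcases hmmem with ⟨j, hjr, hje⟩
    rw [List.mem_range] at hjr
    have hj : j + kn ≤ stones.length := by omega
    have hne := windowL_ne_nil stones kn j hk hj
    rcases hmaxw : PySem.List.max? (windowL stones kn j) (fun x => x) with _ | Mj
    · exact absurd ((PySem.List.max?_eq_none_iff _ _).mp hmaxw) hne
    · have hMjmem : Mj ∈ stones := by
        have := PySem.List.max?_mem hmaxw
        exact List.mem_of_mem_drop (List.mem_of_mem_take this)
      rw [← hje]
      simp only [hmaxw, Option.getD_some]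
      exact hmax Mj hMjmem

lemma feas_iff_MW (stones : List Int) (kn : Nat) (hk : 0 < kn) (hn : kn ≤ stones.length) (mid : Int) :
    (checkA (kn : Int) mid stones 0 = true ↔ mid ≤ MW stones kn) := by
  have hchar := checkA_char mid kn hk stones 0 hk
  rw [show ((0 : Nat) : Int) = (0 : Int) by norm_num] at hchar
  have hfw : checkA (kn : Int) mid stones 0 = false ↔ win mid kn stones := by
    rw [hchar]
    constructor
    · rintro (⟨h1, h2⟩ | h)
      · exact ⟨0, by simpa using h1, by simpa using h2⟩
      · exact h
    · intro h; exact Or.inr h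
  rw [← not_win_iff_MW stones kn mid hk hn, ← hfw]
  rcases Bool.eq_false_or_eq_true (checkA (kn : Int) mid stones 0) with h | h <;> simp [h]

lemma B_eval_in_range (stones : List Int) (k : Int) (hk : 0 < k)
    (hn : k ≤ (stones.length : Int)) :
    solution_alt stones k = max 1 (MW stones k.toNat) := by
  have hkn : k = (k.toNat : Int) := by omega
  simp only [solution_alt, PySem.List.len_eq]
  have hcond : 0 < k ∧ k ≤ (stones.length : Int) := ⟨hk, hn⟩
  rw [if_pos hcond]
  have hcast : (stones.length : Int) - k + 1 = ((stones.length - k.toNat + 1 : Nat) : Int) := by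
    omega
  rw [hcast, PySem.List.pyRange_zero_natCast, List.map_map]
  have hmap : ∀ j : Nat,
      ((fun i => (PySem.List.max? (PySem.List.slice stones (some i) (some (i + k))) (fun x => x)).getD 0) ∘
        (fun j : Nat => (j : Int))) j
      = (fun j => (PySem.List.max? (windowL stones k.toNat j) (fun x => x)).getD 0) j := by
    intro j
    simp only [Function.comp_apply]
    rw [hkn, PySem.List.slice_natCast_add]
    rfl
  rw [List.map_congr_left (fun j _ => hmap j)]
  have : ((PySem.List.min? (wmaxL stones k.toNat) (fun x => x)).getD 0) = MW stones k.toNat := rfl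
  rw [show (List.range (stones.length - k.toNat + 1)).map
        (fun j => (PySem.List.max? (windowL stones k.toNat j) (fun x => x)).getD 0)
      = wmaxL stones k.toNat from rfl]
  rw [this]
  omega

-- ===== VERDICT (by name: the statement is the Claim_ definition above) =====
theorem solution_spec : Claim_equal_solution := by
  intro stones k _ hpre
  unfold Spec_solution
  rcases hmax : PySem.List.max? stones (fun x => x) with _ | r0
  · exact absurd ((PySem.List.max?_eq_none_iff _ _).mp hmax) hpre
  have hub : ∀ y ∈ stones, y ≤ r0 := fun y hy => PySem.List.max?_isMax hmax y hy
  simp only [solution, hmax, Option.getD_some]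
  by_cases hk : 0 < k ∧ k ≤ (stones.length : Int)
  · -- 1 ≤ k ≤ len: the answer is max 1 (min over k-windows of the window max)
    have hkpos : 0 < k.toNat := by omega
    have hklen : k.toNat ≤ stones.length := by omega
    have hkc : k = (k.toNat : Int) := by omega
    have hF : ∀ mid, 0 ≤ mid → mid ≤ r0 →
        (checkA k mid stones 0 = true ↔ mid ≤ MW stones k.toNat) := by
      intro mid _ _
      rw [hkc]
      exact feas_iff_MW stones k.toNat hkpos hklen mid
    rw [loopA_eval stones k (MW stones k.toNat) (r0 + 1 - 0).toNat 0 r0 1 (by omega) hF]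
    rw [B_eval_in_range stones k hk.1 hk.2]
    have hMr : MW stones k.toNat ≤ r0 := MW_le_of_max stones k.toNat r0 hkpos hklen hub
    split_ifs <;> omega
  · -- k ≤ 0 or k > len: every jump value is feasible, the answer is max 1 (max stones)
    have hFtrue : ∀ mid, checkA k mid stones 0 = true := by
      intro mid
      rcases lt_or_ge 0 k with hk0 | hk0
      · exact checkA_true_of_k_large k mid stones 0 (by omega) (by push Not at hk; have := hk hk0; omega)
      · exact checkA_true_of_k_nonpos k mid hk0 stones 0 (by omega)
    have hF : ∀ mid, 0 ≤ mid → mid ≤ r0 → (checkA k mid stones 0 = true ↔ mid ≤ r0) := by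
      intro mid _ hm
      simp [hFtrue mid, hm]
    rw [loopA_eval stones k r0 (r0 + 1 - 0).toNat 0 r0 1 (by omega) hF]
    simp only [solution_alt, PySem.List.len_eq]
    rw [if_neg hk, hmax]
    simp only [Option.getD_some]
    split_ifs <;> omega
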